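-- pv_equiv track=rewrite | github.com/madhu007M/Medical-Report-Summarization-Translation | backend/services/location_service.py | infer_disease
-- ===== SOURCE A (Python) =====
-- from typing import Any, Optional, List, Dict
--
-- DISEASE_SYMPTOM_MAP = {
--     "dengue": {"fever", "rash", "joint pain", "headache", "eye pain", "vomiting"},
--     "flu": {"fever", "cough", "fatigue", "body ache", "sore throat", "chills"},
--     "covid": {"fever", "cough", "difficulty breathing", "loss of taste", "loss of smell", "fatigue"},
--     "malaria": {"fever", "chills", "sweating", "headache", "vomiting", "muscle pain"},
--     "cholera": {"diarrhoea", "vomiting", "dehydration", "muscle cramps"},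
--     "typhoid": {"fever", "abdominal pain", "headache", "diarrhoea", "fatigue"},
-- }
--
-- def infer_disease(symptoms: List[str]) -> Optional[str]:
--     """
--     Infer likely disease from a list of symptom strings.
--
--     Returns the best-matching disease name or None.
--     """
--     symptom_set = {s.lower().strip() for s in symptoms}
--     best_match = None
--     best_score = 0
--
--     for disease, disease_symptoms in DISEASE_SYMPTOM_MAP.items():
--         overlap = len(symptom_set & disease_symptoms)
--         if overlap > best_score:
--             best_score = overlap
--             best_match = disease
--
--     return best_match if best_score >= 2 else None
-- ===== SOURCE B (Python) =====
-- from typing import Any, Optional, List, Dict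
--
-- DISEASE_SYMPTOM_MAP = {
--     "dengue": {"fever", "rash", "joint pain", "headache", "eye pain", "vomiting"},
--     "flu": {"fever", "cough", "fatigue", "body ache", "sore throat", "chills"},
--     "covid": {"fever", "cough", "difficulty breathing", "loss of taste", "loss of smell", "fatigue"},
--     "malaria": {"fever", "chills", "sweating", "headache", "vomiting", "muscle pain"},
--     "cholera": {"diarrhoea", "vomiting", "dehydration", "muscle cramps"},
--     "typhoid": {"fever", "abdominal pain", "headache", "diarrhoea", "fatigue"},
-- }
--
-- # Inverted index, built once at import time: symptom -> diseases whose set contains it.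
-- SYMPTOM_TO_DISEASES: Dict[str, List[str]] = {}
-- for _disease, _symptoms in DISEASE_SYMPTOM_MAP.items():
--     for _s in _symptoms:
--         SYMPTOM_TO_DISEASES.setdefault(_s, []).append(_disease)
--
-- def infer_disease(symptoms: List[str]) -> Optional[str]:
--     """Single-pass scoring over a precomputed inverted symptom index;
--     returns the best-scoring disease (first in map order on ties) or None."""
--     seen = set()
--     scores: Dict[str, int] = {}
--     for raw in symptoms:
--         s = raw.lower().strip()
--         if s not in seen:
--             seen.add(s)
--             for disease in SYMPTOM_TO_DISEASES.get(s, ()):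
--                 scores[disease] = scores.get(disease, 0) + 1
--
--     best_match, best_score = None, 0
--     for disease in DISEASE_SYMPTOM_MAP:
--         score = scores.get(disease, 0)
--         if score > best_score:
--             best_match, best_score = disease, score
--
--     return best_match if best_score >= 2 else None
-- ===== Notes on version B (the rewrite author's own statement) =====
-- stated objective: alternative
-- what changed: Replaces A's per-disease set-intersection scan with a precomputed inverted index (symptom -> diseases) and a single deduplicating pass over the symptoms that accumulates a score dict, followed by the insertion-order strict-max scan.
import Mathlib
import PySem

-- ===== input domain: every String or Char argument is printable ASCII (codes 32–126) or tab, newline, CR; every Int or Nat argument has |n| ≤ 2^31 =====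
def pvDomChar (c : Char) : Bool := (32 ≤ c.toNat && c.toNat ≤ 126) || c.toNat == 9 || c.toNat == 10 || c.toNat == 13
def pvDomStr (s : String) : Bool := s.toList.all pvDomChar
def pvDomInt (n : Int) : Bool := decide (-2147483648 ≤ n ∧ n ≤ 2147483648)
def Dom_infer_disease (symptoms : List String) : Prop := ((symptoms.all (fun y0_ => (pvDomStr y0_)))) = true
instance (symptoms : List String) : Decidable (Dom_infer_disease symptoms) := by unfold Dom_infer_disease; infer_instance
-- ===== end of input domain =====

-- B replaces A's per-disease set-intersection scan with a precomputed inverted index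
-- (symptom -> diseases) and one deduplicating pass accumulating a score dictionary
-- (objective: alternative algorithm of similar cost on this fixed disease map).

-- ===== PORT A =====
-- module-level constant DISEASE_SYMPTOM_MAP (the set values are literal distinct strings)
def pvDiseaseMap : List (String × List String) := [
  ("dengue", ["fever", "rash", "joint pain", "headache", "eye pain", "vomiting"]),
  ("flu", ["fever", "cough", "fatigue", "body ache", "sore throat", "chills"]),
  ("covid", ["fever", "cough", "difficulty breathing", "loss of taste", "loss of smell", "fatigue"]),
  ("malaria", ["fever", "chills", "sweating", "headache", "vomiting", "muscle pain"]),
  ("cholera", ["diarrhoea", "vomiting", "dehydration", "muscle cramps"]),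
  ("typhoid", ["fever", "abdominal pain", "headache", "diarrhoea", "fatigue"])]

def infer_disease (symptoms : List String) : Option String :=
  let symptom_set : PySem.Set String :=
    PySem.Set.ofList (symptoms.map (fun s => PySem.Str.strip (PySem.Str.lower s)))
  let st : Option String × Int := pvDiseaseMap.foldl (fun st p =>
      let overlap : Int := PySem.Set.len (PySem.Set.inter symptom_set p.2)
      if overlap > st.2 then (some p.1, overlap) else st)
    (none, 0)
  if st.2 ≥ 2 then st.1 else none

-- ===== PORT B =====
-- module-level inverted index SYMPTOM_TO_DISEASES, built once by the two nested loops in Source B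
def pvSymptomIndex : PySem.Dict String (List String) :=
  pvDiseaseMap.foldl
    (fun d p => p.2.foldl (fun d s => PySem.Dict.modify d s [] (· ++ [p.1])) d)
    PySem.Dict.empty

-- body of Source B's main loop: skip already-seen symptoms, else mark seen and bump the
-- score of every disease listed in the inverted index for this symptom
def pvStepB (acc : PySem.Set String × PySem.Dict String Int) (s : String) :
    PySem.Set String × PySem.Dict String Int :=
  if !(PySem.Set.contains acc.1 s) then
    (PySem.Set.add acc.1 s,
     (PySem.Dict.getD pvSymptomIndex s []).foldl
       (fun sc d => PySem.Dict.modify sc d 0 (· + 1)) acc.2)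
  else acc

def infer_disease_alt (symptoms : List String) : Option String :=
  let st0 : PySem.Set String × PySem.Dict String Int :=
    symptoms.foldl (fun acc raw => pvStepB acc (PySem.Str.strip (PySem.Str.lower raw)))
      (PySem.Set.empty, PySem.Dict.empty)
  let scores : PySem.Dict String Int := st0.2
  let st : Option String × Int := pvDiseaseMap.foldl (fun st p =>
      let score : Int := PySem.Dict.getD scores p.1 0
      if score > st.2 then (some p.1, score) else st)
    (none, 0)
  if st.2 ≥ 2 then st.1 else none

-- ===== PRECONDITION & SPEC =====
def Spec_infer_disease (symptoms : List String) (out : Option String) : Prop := out = infer_disease_alt symptoms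
instance (symptoms : List String) (out : Option String) : Decidable (Spec_infer_disease symptoms out) := by unfold Spec_infer_disease; infer_instance

-- ===== CLAIM (what is proved, stated in full; the proofs are below) =====
def Claim_equal_infer_disease : Prop := ∀ (symptoms : List String), Dom_infer_disease symptoms → Spec_infer_disease symptoms (infer_disease symptoms)

-- ===== LEMMAS AND PROOFS =====

-- appending one disease x to the rows of the (distinct) symptoms q changes the count of
-- dis in row s by 1 exactly when s ∈ q and x = dis
lemma row_count (x dis s : String) (q : List String) (hq : q.Nodup)
    (d : PySem.Dict String (List String)) :
    ((q.foldl (fun d t => PySem.Dict.modify d t [] (· ++ [x])) d).getD s []).count dis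
      = (d.getD s []).count dis + (if s ∈ q then (if x == dis then 1 else 0) else 0) := by
  induction q generalizing d with
  | nil => simp
  | cons t q ih =>
    rw [List.foldl_cons, ih (List.nodup_cons.mp hq).2]
    rw [PySem.Dict.getD_modify]
    by_cases hs : s = t
    · subst hs
      have hsq : s ∉ q := (List.nodup_cons.mp hq).1
      simp only [List.count_append, List.mem_cons, true_or, if_pos, hsq,
        if_false, List.count_cons, List.count_nil]
      by_cases hx : x == dis <;> simp [hx]
    · rw [if_neg hs]
      simp [List.mem_cons, hs]

-- the inverted index built from any map M with duplicate-free rows: the number of copies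
-- of dis in the row of s counts the entries of M that list s under disease dis
lemma build_count (M : List (String × List String)) (hM : ∀ p ∈ M, p.2.Nodup)
    (dis s : String) (d0 : PySem.Dict String (List String)) :
    ((M.foldl (fun d p => p.2.foldl (fun d s => PySem.Dict.modify d s [] (· ++ [p.1])) d) d0).getD s []).count dis
      = ((d0.getD s []).count dis) + M.countP (fun p => p.1 == dis && decide (s ∈ p.2)) := by
  induction M generalizing d0 with
  | nil => simp
  | cons p M ih =>
    rw [List.foldl_cons, ih (fun q hq => hM q (List.mem_cons_of_mem p hq)),
      row_count p.1 dis s p.2 (hM p (List.mem_cons_self)) d0, List.countP_cons]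
    by_cases h1 : p.1 == dis <;> by_cases h2 : s ∈ p.2 <;> simp [h1, h2] <;> omega

set_option maxHeartbeats 800000 in
lemma idx_count_dengue (s : String) :
    ((PySem.Dict.getD pvSymptomIndex s []).count "dengue" : Int) =
      if s ∈ (["fever", "rash", "joint pain", "headache", "eye pain", "vomiting"] : List String) then 1 else 0 := by
  unfold pvSymptomIndex
  rw [build_count pvDiseaseMap (by decide) "dengue" s PySem.Dict.empty]
  by_cases hd : s ∈ (["fever", "rash", "joint pain", "headache", "eye pain", "vomiting"] : List String) <;>
    simp [pvDiseaseMap, PySem.Dict.getD_empty, hd]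

set_option maxHeartbeats 800000 in
lemma idx_count_flu (s : String) :
    ((PySem.Dict.getD pvSymptomIndex s []).count "flu" : Int) =
      if s ∈ (["fever", "cough", "fatigue", "body ache", "sore throat", "chills"] : List String) then 1 else 0 := by
  unfold pvSymptomIndex
  rw [build_count pvDiseaseMap (by decide) "flu" s PySem.Dict.empty]
  by_cases hd : s ∈ (["fever", "cough", "fatigue", "body ache", "sore throat", "chills"] : List String) <;>
    simp [pvDiseaseMap, PySem.Dict.getD_empty, hd]

set_option maxHeartbeats 800000 in
lemma idx_count_covid (s : String) :
    ((PySem.Dict.getD pvSymptomIndex s []).count "covid" : Int) =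
      if s ∈ (["fever", "cough", "difficulty breathing", "loss of taste", "loss of smell", "fatigue"] : List String) then 1 else 0 := by
  unfold pvSymptomIndex
  rw [build_count pvDiseaseMap (by decide) "covid" s PySem.Dict.empty]
  by_cases hd : s ∈ (["fever", "cough", "difficulty breathing", "loss of taste", "loss of smell", "fatigue"] : List String) <;>
    simp [pvDiseaseMap, PySem.Dict.getD_empty, hd]

set_option maxHeartbeats 800000 in
lemma idx_count_malaria (s : String) :
    ((PySem.Dict.getD pvSymptomIndex s []).count "malaria" : Int) =
      if s ∈ (["fever", "chills", "sweating", "headache", "vomiting", "muscle pain"] : List String) then 1 else 0 := by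
  unfold pvSymptomIndex
  rw [build_count pvDiseaseMap (by decide) "malaria" s PySem.Dict.empty]
  by_cases hd : s ∈ (["fever", "chills", "sweating", "headache", "vomiting", "muscle pain"] : List String) <;>
    simp [pvDiseaseMap, PySem.Dict.getD_empty, hd]

set_option maxHeartbeats 800000 in
lemma idx_count_cholera (s : String) :
    ((PySem.Dict.getD pvSymptomIndex s []).count "cholera" : Int) =
      if s ∈ (["diarrhoea", "vomiting", "dehydration", "muscle cramps"] : List String) then 1 else 0 := by
  unfold pvSymptomIndex
  rw [build_count pvDiseaseMap (by decide) "cholera" s PySem.Dict.empty]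
  by_cases hd : s ∈ (["diarrhoea", "vomiting", "dehydration", "muscle cramps"] : List String) <;>
    simp [pvDiseaseMap, PySem.Dict.getD_empty, hd]

set_option maxHeartbeats 800000 in
lemma idx_count_typhoid (s : String) :
    ((PySem.Dict.getD pvSymptomIndex s []).count "typhoid" : Int) =
      if s ∈ (["fever", "abdominal pain", "headache", "diarrhoea", "fatigue"] : List String) then 1 else 0 := by
  unfold pvSymptomIndex
  rw [build_count pvDiseaseMap (by decide) "typhoid" s PySem.Dict.empty]
  by_cases hd : s ∈ (["fever", "abdominal pain", "headache", "diarrhoea", "fatigue"] : List String) <;>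
    simp [pvDiseaseMap, PySem.Dict.getD_empty, hd]

-- invariant of Source B's single pass: the accumulated score of dis counts the distinct
-- not-yet-seen symptoms that lie in dis's row T
lemma one_pass (dis : String) (T : List String)
    (h : ∀ s : String, ((PySem.Dict.getD pvSymptomIndex s []).count dis : Int) = if s ∈ T then 1 else 0)
    (ys : List String) :
    ∀ (seen : PySem.Set String) (sc : PySem.Dict String Int),
    PySem.Dict.getD (ys.foldl pvStepB (seen, sc)).2 dis 0
      = PySem.Dict.getD sc dis 0 +
        ((List.countP (fun s => decide (s ∈ T) && !(PySem.Set.contains seen s))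
            (PySem.Set.ofList ys) : Nat) : Int) := by
  induction ys with
  | nil => intro seen sc; simp
  | cons y ys ih =>
    intro seen sc
    rw [List.foldl_cons]
    by_cases hy : y ∈ seen
    · have hstep : pvStepB (seen, sc) y = (seen, sc) := by simp [pvStepB, hy]
      rw [hstep, ih seen sc, PySem.Set.ofList_cons, List.countP_cons]
      have hpy : (decide (y ∈ T) && !(PySem.Set.contains seen y)) = false := by simp [hy]
      rw [hpy]
      have hfilt : List.countP (fun s => decide (s ∈ T) && !(PySem.Set.contains seen s))
            (PySem.Set.discard (PySem.Set.ofList ys) y)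
          = List.countP (fun s => decide (s ∈ T) && !(PySem.Set.contains seen s))
            (PySem.Set.ofList ys) := by
        simp only [PySem.Set.discard, List.countP_filter]
        apply List.countP_congr
        intro a _
        by_cases ha : a = y
        · subst ha; simp [hy]
        · simp [ha]
      rw [hfilt]
      simp
    · have hstep : pvStepB (seen, sc) y
          = (PySem.Set.add seen y,
             (PySem.Dict.getD pvSymptomIndex y []).foldl
               (fun sc d => PySem.Dict.modify sc d 0 (· + 1)) sc) := by
        simp [pvStepB, hy]
      rw [hstep, ih _ _, PySem.Dict.getD_foldl_modify_add_one, h y,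
        PySem.Set.ofList_cons, List.countP_cons]
      have hpy : (decide (y ∈ T) && !(PySem.Set.contains seen y)) = decide (y ∈ T) := by
        simp [hy]
      rw [hpy]
      have hfilt : List.countP (fun s => decide (s ∈ T) && !(PySem.Set.contains (PySem.Set.add seen y) s))
            (PySem.Set.ofList ys)
          = List.countP (fun s => decide (s ∈ T) && !(PySem.Set.contains seen s))
            (PySem.Set.discard (PySem.Set.ofList ys) y) := by
        simp only [PySem.Set.discard, List.countP_filter]
        apply List.countP_congr
        intro a _
        by_cases ha : a = y
        · subst ha; simp [PySem.Set.mem_add]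
        · simp [PySem.Set.mem_add, ha]
      rw [hfilt]
      by_cases hyT : y ∈ T <;> simp [hyT] <;> ring

-- Source B's scores dict, looked up at dis, is the size of the overlap with dis's row T
lemma scores_getD (dis : String) (T : List String)
    (h : ∀ s : String, ((PySem.Dict.getD pvSymptomIndex s []).count dis : Int) = if s ∈ T then 1 else 0)
    (ys : List String) :
    PySem.Dict.getD (ys.foldl pvStepB (PySem.Set.empty, PySem.Dict.empty)).2 dis 0
      = ((List.countP (fun s => decide (s ∈ T)) (PySem.Set.ofList ys) : Nat) : Int) := by
  rw [one_pass dis T h ys PySem.Set.empty PySem.Dict.empty]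
  simp [PySem.Set.empty, PySem.Set.contains]

-- A's overlap is the same count
lemma inter_len (xs T : List String) :
    PySem.Set.len (PySem.Set.inter xs T) = ((List.countP (fun s => decide (s ∈ T)) xs : Nat) : Int) := by
  simp [PySem.Set.len, PySem.Set.inter, ← List.countP_eq_length_filter]

-- Source B normalizes inside its loop; the same loop over the normalized list
set_option maxHeartbeats 1600000 in
lemma foldl_norm (xs : List String) (init : PySem.Set String × PySem.Dict String Int) :
    xs.foldl (fun acc raw => pvStepB acc (PySem.Str.strip (PySem.Str.lower raw))) init
      = (xs.map (fun s => PySem.Str.strip (PySem.Str.lower s))).foldl pvStepB init := by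
  induction xs generalizing init with
  | nil => simp only [List.foldl_nil, List.map_nil]
  | cons x xs ih =>
    rw [List.map_cons, List.foldl_cons, List.foldl_cons]
    exact ih _

-- ===== VERDICT (by name: the statement is the Claim_ definition above) =====
set_option maxHeartbeats 1600000 in
theorem infer_disease_spec : Claim_equal_infer_disease := by
  intro symptoms _
  unfold Spec_infer_disease infer_disease infer_disease_alt
  simp only [pvDiseaseMap, List.foldl_cons, List.foldl_nil]
  rw [foldl_norm]
  rw [scores_getD _ _ idx_count_dengue, scores_getD _ _ idx_count_flu,
    scores_getD _ _ idx_count_covid, scores_getD _ _ idx_count_malaria,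
    scores_getD _ _ idx_count_cholera, scores_getD _ _ idx_count_typhoid]
  simp only [inter_len]
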